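-- pv_equiv track=rewrite | github.com/misakihiyo/graphics | 3dref.py | ref_x
-- ===== SOURCE A (Python) =====
-- def ref_x(x,y,z):
--  A = [[-1, 0, 0, 0],
--       [0, 1, 0, 0],
--       [0, 0, 1, 0],
--       [0, 0, 0, 1]]
--
--  B = [[x],
--       [y],
--       [z],
--       [1]]
--
--  result = [[0],
--            [0],
--            [0],
--            [1]]
--
--  # iterate through rows of A
--  for i in range(len(A)):
--    # iterate through columns of B
--    for j in range(len(B[0])):
--        # iterate through rows of B
--        for k in range(len(B)):
--            result[i][j] += A[i][k] * B[k][j]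
--
--  return result[0][0],result[1][0],result[2][0]
-- ===== SOURCE B (Python) =====
-- def ref_x(x, y, z):
--     return -x, y, z
-- ===== Notes on version B (the rewrite author's own statement) =====
-- stated objective: simpler
-- what changed: Replaced the 4x4 matrix, homogeneous column vector and triple-nested multiply-accumulate loop with the closed-form reflection (-x, y, z).
import Mathlib
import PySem

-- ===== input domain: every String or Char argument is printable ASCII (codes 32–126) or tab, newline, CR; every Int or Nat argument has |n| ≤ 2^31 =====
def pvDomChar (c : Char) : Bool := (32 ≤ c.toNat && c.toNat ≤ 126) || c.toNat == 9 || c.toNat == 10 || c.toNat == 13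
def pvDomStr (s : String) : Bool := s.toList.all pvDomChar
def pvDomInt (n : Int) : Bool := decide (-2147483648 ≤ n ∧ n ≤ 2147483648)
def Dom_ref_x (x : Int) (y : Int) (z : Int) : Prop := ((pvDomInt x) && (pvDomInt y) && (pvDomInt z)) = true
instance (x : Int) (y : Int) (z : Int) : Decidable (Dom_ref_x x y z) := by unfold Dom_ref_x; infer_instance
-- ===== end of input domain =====

-- B replaces A's 4x4 matrix multiplication loop with the closed form (-x, y, z); objective: simpler.


-- ===== PORT A =====
-- Literal port of A: constant 4x4 matrix, homogeneous column vector, triple-nested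
-- multiply-accumulate loop over ranges, then the first three result entries.
def ref_x (x : Int) (y : Int) (z : Int) : Int × Int × Int :=
  let A : List (List Int) := [[-1, 0, 0, 0], [0, 1, 0, 0], [0, 0, 1, 0], [0, 0, 0, 1]]
  let B : List (List Int) := [[x], [y], [z], [1]]
  let result0 : List (List Int) := [[0], [0], [0], [1]]
  -- result[i][j] += A[i][k] * B[k][j]; all indices are in range, so getD never hits its default
  let result :=
    (List.range A.length).foldl (fun r i =>
      (List.range (B.headD []).length).foldl (fun r j =>
        (List.range B.length).foldl (fun r k =>
          r.modify i (fun row => row.modify j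
            (fun v => v + (A.getD i []).getD k 0 * (B.getD k []).getD j 0))) r) r) result0
  ((result.getD 0 []).getD 0 0, (result.getD 1 []).getD 0 0, (result.getD 2 []).getD 0 0)

-- ===== PORT B =====
-- B: closed-form reflection across the x axis.
def ref_x_alt (x : Int) (y : Int) (z : Int) : Int × Int × Int := (-x, y, z)

-- ===== PRECONDITION & SPEC =====
def Spec_ref_x (x : Int) (y : Int) (z : Int) (out : Int × Int × Int) : Prop := out = ref_x_alt x y z
instance (x : Int) (y : Int) (z : Int) (out : Int × Int × Int) : Decidable (Spec_ref_x x y z out) := by unfold Spec_ref_x; infer_instance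

-- ===== CLAIM (what is proved, stated in full; the proofs are below) =====
def Claim_equal_ref_x : Prop := ∀ (x : Int) (y : Int) (z : Int), Dom_ref_x x y z → Spec_ref_x x y z (ref_x x y z)

-- ===== LEMMAS AND PROOFS =====

-- ===== VERDICT (by name: the statement is the Claim_ definition above) =====
theorem ref_x_spec : Claim_equal_ref_x := by
  intro x y z _
  unfold Spec_ref_x ref_x ref_x_alt
  simp [List.range_succ, List.modify, List.modifyTailIdx, List.modifyTailIdx.go, List.modifyHead]
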